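-- pv_equiv track=rewrite | github.com/Jungkihong07/codingTest | ssafy/D3/24001.py | solve
-- ===== SOURCE A (Python) =====
-- def solve(code: list):
--     max_index = 0
--     for prompt in ["L", "R"]:
--         _index = []
--         index = 0
--         for c in code:
--             if c == "?":
--                 c = prompt
--             if c == "L":
--                 index -= 1
--                 _index.append(abs(index))
--             elif c == "R":
--                 index += 1
--                 _index.append(abs(index))
--         max_index = max(max(_index), max_index)
--     return max_index
-- ===== SOURCE B (Python) =====
-- def solve(code: list):
--     # One pass over code, simulating both '?'-substitutions at once;
--     # keeps running min/max of each signed position instead of a list of abs values.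
--     pl = pr = 0
--     lo_l = hi_l = lo_r = hi_r = 0
--     for c in code:
--         if c == "L" or c == "?":
--             pl -= 1
--             lo_l = min(lo_l, pl)
--         elif c == "R":
--             pl += 1
--             hi_l = max(hi_l, pl)
--         if c == "R" or c == "?":
--             pr += 1
--             hi_r = max(hi_r, pr)
--         elif c == "L":
--             pr -= 1
--             lo_r = min(lo_r, pr)
--     return max(hi_l, -lo_l, hi_r, -lo_r)
-- ===== Notes on version B (the rewrite author's own statement) =====
-- stated objective: alternative
-- what changed: B makes a single pass over code simulating both '?'-substitutions simultaneously, maintaining running min/max of the two signed positions and returning max(hi_l,-lo_l,hi_r,-lo_r), instead of A's two passes each appending abs(position) to a list and taking max of that list.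
-- crash fix: On codes containing no element equal to 'L', 'R' or '?', A raises ValueError (max of an empty list) while B returns 0, the maximal distance of a walk with no moves. — e.g. on solve(["x"]): A raises ValueError, B returns 0
import Mathlib
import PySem

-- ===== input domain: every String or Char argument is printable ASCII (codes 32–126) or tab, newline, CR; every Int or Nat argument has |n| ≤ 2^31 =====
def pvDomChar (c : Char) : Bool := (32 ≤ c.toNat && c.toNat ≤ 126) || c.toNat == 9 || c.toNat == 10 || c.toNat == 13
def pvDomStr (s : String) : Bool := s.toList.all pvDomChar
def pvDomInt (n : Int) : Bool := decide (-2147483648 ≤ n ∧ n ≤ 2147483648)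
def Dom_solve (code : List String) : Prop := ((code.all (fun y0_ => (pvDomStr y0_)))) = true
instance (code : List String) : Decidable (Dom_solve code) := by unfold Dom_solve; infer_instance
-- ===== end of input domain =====

-- B replaces A's two list-building passes by one pass keeping running min/max of both signed positions.
-- ===== PORT A =====
-- inner loop body of A for a fixed prompt: state = (_index, index)
def solveStepA (prompt : String) (st : List Int × Int) (c : String) : List Int × Int :=
  let c := if c = "?" then prompt else c
  if c = "L" then (st.1 ++ [|st.2 - 1|], st.2 - 1)
  else if c = "R" then (st.1 ++ [|st.2 + 1|], st.2 + 1)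
  else st

def solve (code : List String) : Int :=
  ["L", "R"].foldl
    (fun maxIndex prompt =>
      let st := code.foldl (solveStepA prompt) ([], 0)
      -- Python's max(_index) raises ValueError on the empty list; Pre_solve excludes that, getD 0 is arbitrary there
      max ((PySem.List.max? st.1 (fun y => y)).getD 0) maxIndex)
    0

-- ===== PORT B =====
-- single-pass loop body: state = (pl, lo_l, hi_l, pr, lo_r, hi_r)
def solveStepB (st : Int × Int × Int × Int × Int × Int) (c : String) : Int × Int × Int × Int × Int × Int :=
  let (pl, lol, hil, pr, lor, hir) := st
  let (pl, lol, hil) :=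
    if c = "L" ∨ c = "?" then (pl - 1, min lol (pl - 1), hil)
    else if c = "R" then (pl + 1, lol, max hil (pl + 1))
    else (pl, lol, hil)
  let (pr, lor, hir) :=
    if c = "R" ∨ c = "?" then (pr + 1, lor, max hir (pr + 1))
    else if c = "L" then (pr - 1, min lor (pr - 1), hir)
    else (pr, lor, hir)
  (pl, lol, hil, pr, lor, hir)

def solve_alt (code : List String) : Int :=
  let (_, lol, hil, _, lor, hir) := code.foldl solveStepB (0, 0, 0, 0, 0, 0)
  max hil (max (-lol) (max hir (-lor)))

-- ===== PRECONDITION & SPEC =====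
-- Pre_ excludes exactly the codes with no "L"/"R"/"?" element, on which Python A raises ValueError (max of empty list).
def Pre_solve (code : List String) : Prop := ∃ c ∈ code, c = "L" ∨ c = "R" ∨ c = "?"
instance (code : List String) : Decidable (Pre_solve code) := by unfold Pre_solve; infer_instance
def pvWitness_solve : List String := (["R"])
def Spec_solve (code : List String) (out : Int) : Prop := out = solve_alt code
instance (code : List String) (out : Int) : Decidable (Spec_solve code out) := by unfold Spec_solve; infer_instance

-- On codes with no element equal to "L", "R" or "?", A raises ValueError while B returns 0 (no moves).
def Raises_solve (code : List String) : Prop := ∀ c ∈ code, ¬(c = "L" ∨ c = "R" ∨ c = "?")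
instance (code : List String) : Decidable (Raises_solve code) := by unfold Raises_solve; infer_instance
def pvRaiseWitness_solve : List String := (["x"])
def pvRaiseWitnessOut_solve : Int := 0

-- ===== CLAIM (what is proved, stated in full; the proofs are below) =====
def Claim_equal_solve : Prop := ∀ (code : List String), Dom_solve code → Pre_solve code → Spec_solve code (solve code)
def Claim_raises_solve : Prop := (∀ (code : List String), Dom_solve code → Raises_solve code → ¬ Pre_solve code) ∧ (Dom_solve (pvRaiseWitness_solve) ∧ Raises_solve (pvRaiseWitness_solve) ∧ solve_alt (pvRaiseWitness_solve) = pvRaiseWitnessOut_solve)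

-- ===== LEMMAS AND PROOFS =====

-- proof-only helpers: B's single loop split into its two independent halves
def stepL (st : Int × Int × Int) (c : String) : Int × Int × Int :=
  if c = "L" ∨ c = "?" then (st.1 - 1, min st.2.1 (st.1 - 1), st.2.2)
  else if c = "R" then (st.1 + 1, st.2.1, max st.2.2 (st.1 + 1))
  else st

def stepR (st : Int × Int × Int) (c : String) : Int × Int × Int :=
  if c = "R" ∨ c = "?" then (st.1 + 1, st.2.1, max st.2.2 (st.1 + 1))
  else if c = "L" then (st.1 - 1, min st.2.1 (st.1 - 1), st.2.2)
  else st

theorem splitB (code : List String) : ∀ (a b c d e f : Int),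
    code.foldl solveStepB (a, b, c, d, e, f) =
      ((code.foldl stepL (a, b, c)).1, (code.foldl stepL (a, b, c)).2.1, (code.foldl stepL (a, b, c)).2.2,
       (code.foldl stepR (d, e, f)).1, (code.foldl stepR (d, e, f)).2.1, (code.foldl stepR (d, e, f)).2.2) := by
  induction code with
  | nil => intro a b c d e f; simp [List.foldl]
  | cons x xs ih =>
    intro a b c d e f
    simp only [List.foldl, solveStepB, stepL, stepR]
    split_ifs <;> simp_all

theorem neA (p : String) (hp : p = "L" ∨ p = "R") (code : List String) :
    ∀ (idxs : List Int) (pos : Int),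
    (idxs ≠ [] ∨ ∃ c ∈ code, c = "L" ∨ c = "R" ∨ c = "?") →
    (code.foldl (solveStepA p) (idxs, pos)).1 ≠ [] := by
  induction code with
  | nil =>
    intro idxs pos h
    rcases h with h | ⟨c, hc, _⟩
    · simpa using h
    · simp at hc
  | cons x xs ih =>
    intro idxs pos h
    simp only [List.foldl]
    by_cases hm : x = "L" ∨ x = "R" ∨ x = "?"
    · apply ih; left
      rcases hp with rfl | rfl <;> rcases hm with rfl | rfl | rfl <;>
        exact List.append_ne_nil_of_right_ne_nil _ (List.cons_ne_nil _ _)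
    · have hstep : solveStepA p (idxs, pos) x = (idxs, pos) := by
        push_neg at hm
        simp [solveStepA, hm.1, hm.2.1, hm.2.2]
      rw [hstep]
      apply ih
      rcases h with h | ⟨c, hc, hmv⟩
      · exact Or.inl h
      · rcases List.mem_cons.mp hc with rfl | hc'
        · exact absurd hmv hm
        · exact Or.inr ⟨c, hc', hmv⟩

theorem invL (code : List String) : ∀ (idxs : List Int) (pos lo hi : Int),
    lo ≤ 0 → 0 ≤ hi → lo ≤ pos → pos ≤ hi → idxs.foldl max 0 = max hi (-lo) → (∀ x ∈ idxs, 0 ≤ x) →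
    (code.foldl (solveStepA "L") (idxs, pos)).1.foldl max 0
        = max (code.foldl stepL (pos, lo, hi)).2.2 (-(code.foldl stepL (pos, lo, hi)).2.1)
      ∧ (∀ x ∈ (code.foldl (solveStepA "L") (idxs, pos)).1, 0 ≤ x) := by
  induction code with
  | nil => intro idxs pos lo hi h1 h2 h5 h6 h3 h4; exact ⟨h3, h4⟩
  | cons c cs ih =>
    intro idxs pos lo hi h1 h2 h5 h6 h3 h4
    simp only [List.foldl]
    by_cases hL : c = "L" ∨ c = "?"
    · have hA : solveStepA "L" (idxs, pos) c = (idxs ++ [|pos - 1|], pos - 1) := by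
        rcases hL with rfl | rfl <;> rfl
      have hB : stepL (pos, lo, hi) c = (pos - 1, min lo (pos - 1), hi) := by
        simp only [stepL, if_pos hL]
      rw [hA, hB]
      apply ih
      · omega
      · omega
      · omega
      · omega
      · rw [List.foldl_append]
        simp only [List.foldl]
        rw [h3]
        rcases abs_cases (pos - 1) with ⟨he, _⟩ | ⟨he, _⟩ <;> rw [he] <;> omega
      · intro x hx
        rcases List.mem_append.mp hx with hx | hx
        · exact h4 x hx
        · simp at hx; subst hx; exact abs_nonneg _
    · by_cases hR : c = "R"
      · have hA : solveStepA "L" (idxs, pos) c = (idxs ++ [|pos + 1|], pos + 1) := by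
          subst hR; exact rfl
        have hB : stepL (pos, lo, hi) c = (pos + 1, lo, max hi (pos + 1)) := by
          simp only [stepL]; rw [if_neg hL, if_pos hR]
        rw [hA, hB]
        apply ih
        · omega
        · omega
        · omega
        · omega
        · rw [List.foldl_append]
          simp only [List.foldl]
          rw [h3]
          rcases abs_cases (pos + 1) with ⟨he, _⟩ | ⟨he, _⟩ <;> rw [he] <;> omega
        · intro x hx
          rcases List.mem_append.mp hx with hx | hx
          · exact h4 x hx
          · simp at hx; subst hx; exact abs_nonneg _
      · push_neg at hL
        have hA : solveStepA "L" (idxs, pos) c = (idxs, pos) := by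
          simp only [solveStepA]
          rw [if_neg hL.2, if_neg hL.1, if_neg hR]
        have hB : stepL (pos, lo, hi) c = (pos, lo, hi) := by
          simp only [stepL]
          rw [if_neg (by tauto), if_neg hR]
        rw [hA, hB]
        exact ih idxs pos lo hi h1 h2 h5 h6 h3 h4

theorem invR (code : List String) : ∀ (idxs : List Int) (pos lo hi : Int),
    lo ≤ 0 → 0 ≤ hi → lo ≤ pos → pos ≤ hi → idxs.foldl max 0 = max hi (-lo) → (∀ x ∈ idxs, 0 ≤ x) →
    (code.foldl (solveStepA "R") (idxs, pos)).1.foldl max 0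
        = max (code.foldl stepR (pos, lo, hi)).2.2 (-(code.foldl stepR (pos, lo, hi)).2.1)
      ∧ (∀ x ∈ (code.foldl (solveStepA "R") (idxs, pos)).1, 0 ≤ x) := by
  induction code with
  | nil => intro idxs pos lo hi h1 h2 h5 h6 h3 h4; exact ⟨h3, h4⟩
  | cons c cs ih =>
    intro idxs pos lo hi h1 h2 h5 h6 h3 h4
    simp only [List.foldl]
    by_cases hR : c = "R" ∨ c = "?"
    · have hA : solveStepA "R" (idxs, pos) c = (idxs ++ [|pos + 1|], pos + 1) := by
        rcases hR with rfl | rfl <;> rfl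
      have hB : stepR (pos, lo, hi) c = (pos + 1, lo, max hi (pos + 1)) := by
        simp only [stepR, if_pos hR]
      rw [hA, hB]
      apply ih
      · omega
      · omega
      · omega
      · omega
      · rw [List.foldl_append]
        simp only [List.foldl]
        rw [h3]
        rcases abs_cases (pos + 1) with ⟨he, _⟩ | ⟨he, _⟩ <;> rw [he] <;> omega
      · intro x hx
        rcases List.mem_append.mp hx with hx | hx
        · exact h4 x hx
        · simp at hx; subst hx; exact abs_nonneg _
    · by_cases hL : c = "L"
      · have hA : solveStepA "R" (idxs, pos) c = (idxs ++ [|pos - 1|], pos - 1) := by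
          subst hL; exact rfl
        have hB : stepR (pos, lo, hi) c = (pos - 1, min lo (pos - 1), hi) := by
          simp only [stepR]; rw [if_neg hR, if_pos hL]
        rw [hA, hB]
        apply ih
        · omega
        · omega
        · omega
        · omega
        · rw [List.foldl_append]
          simp only [List.foldl]
          rw [h3]
          rcases abs_cases (pos - 1) with ⟨he, _⟩ | ⟨he, _⟩ <;> rw [he] <;> omega
        · intro x hx
          rcases List.mem_append.mp hx with hx | hx
          · exact h4 x hx
          · simp at hx; subst hx; exact abs_nonneg _
      · push_neg at hR
        have hA : solveStepA "R" (idxs, pos) c = (idxs, pos) := by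
          simp only [solveStepA]
          rw [if_neg hR.2, if_neg hR.1, if_neg hL]
        have hB : stepR (pos, lo, hi) c = (pos, lo, hi) := by
          simp only [stepR]
          rw [if_neg (by tauto), if_neg hL]
        rw [hA, hB]
        exact ih idxs pos lo hi h1 h2 h5 h6 h3 h4

theorem boundsL (code : List String) : ∀ (pos lo hi : Int), lo ≤ 0 → 0 ≤ hi →
    (code.foldl stepL (pos, lo, hi)).2.1 ≤ 0 ∧ 0 ≤ (code.foldl stepL (pos, lo, hi)).2.2 := by
  induction code with
  | nil => intro pos lo hi h1 h2; exact ⟨h1, h2⟩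
  | cons c cs ih =>
    intro pos lo hi h1 h2
    simp only [List.foldl, stepL]
    split_ifs <;> apply ih <;> omega

theorem boundsR (code : List String) : ∀ (pos lo hi : Int), lo ≤ 0 → 0 ≤ hi →
    (code.foldl stepR (pos, lo, hi)).2.1 ≤ 0 ∧ 0 ≤ (code.foldl stepR (pos, lo, hi)).2.2 := by
  induction code with
  | nil => intro pos lo hi h1 h2; exact ⟨h1, h2⟩
  | cons c cs ih =>
    intro pos lo hi h1 h2
    simp only [List.foldl, stepR]
    split_ifs <;> apply ih <;> omega

theorem maxGetD (l : List Int) (hne : l ≠ []) (hnn : ∀ x ∈ l, 0 ≤ x) :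
    (PySem.List.max? l (fun y => y)).getD 0 = l.foldl max 0 := by
  cases l with
  | nil => exact absurd rfl hne
  | cons x t =>
    rw [PySem.List.max?_id_cons]
    simp only [Option.getD, List.foldl]
    rw [max_eq_right (hnn x (List.mem_cons_self ..))]

-- ===== VERDICT (by name: the statement is the Claim_ definition above) =====
theorem solve_spec : Claim_equal_solve := by
  intro code _ hpre
  unfold Spec_solve solve solve_alt
  have hneL := neA "L" (Or.inl rfl) code [] 0 (Or.inr hpre)
  have hneR := neA "R" (Or.inr rfl) code [] 0 (Or.inr hpre)
  have hL := invL code [] 0 0 0 (le_refl 0) (le_refl 0) (le_refl 0) (le_refl 0) (by simp) (by simp)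
  have hR := invR code [] 0 0 0 (le_refl 0) (le_refl 0) (le_refl 0) (le_refl 0) (by simp) (by simp)
  have h2L := boundsL code 0 0 0 (le_refl 0) (le_refl 0)
  have h2R := boundsR code 0 0 0 (le_refl 0) (le_refl 0)
  simp only [List.foldl]
  rw [splitB]
  dsimp only
  rw [maxGetD _ hneL hL.2, maxGetD _ hneR hR.2, hL.1, hR.1]
  omega

def solve_raises : Claim_raises_solve := by
  unfold Claim_raises_solve
  exact ⟨by intro code _ hr ⟨c, hc, h⟩; exact hr c hc h, by decide⟩
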